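-- pv_equiv track=rewrite | github.com/geoffder/learning | LP_advanced_rnns/cnn_toxic.py | process
-- ===== SOURCE A (Python) =====
-- import string
--
-- def tokenizer(s):
--     "Remove puncutation, downcase and split on spaces and return a list"
--     s = s.translate(str.maketrans('', '', string.punctuation))
--     s = s.lower()  # downcase
--     return s.split()
--
-- def process(comments):
--     """
--     Take in list of comments (strings) and tokenize them to build word index
--     mappings to allowing conversion of comments into word vectors. Outputs are
--     sequences of indices (used to map words to embeddings), the word->index
--     and index->word) mappings and the frequencies of each word. The
--     frequencies can be used to trim down the vocabulary to the most common
--     words if the original size is too great.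
--     """
--     word_index_map = {'PAD_TOKEN': 0}
--     current_index = 1  # 0 is reserved for padding
--     sequences = []
--     index_word_map = ['PAD_TOKEN']
--     freqs = {}
--     for comment in comments:
--         sequence = []
--         tokens = tokenizer(comment)
--         for token in tokens:
--             if token not in word_index_map:
--                 word_index_map[token] = current_index
--                 current_index += 1
--                 index_word_map.append(token)
--                 freqs[token] = 1
--             else:
--                 freqs[token] += 1
--             sequence.append(word_index_map[token])
--         sequences.append(sequence)
--
--     return sequences, word_index_map, index_word_map, freqs
-- ===== SOURCE B (Python) =====
-- import string
-- from collections import Counter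
--
--
-- def tokenizer(s):
--     "Remove puncutation, downcase and split on spaces and return a list"
--     s = s.translate(str.maketrans('', '', string.punctuation))
--     return s.lower().split()
--
--
-- def process(comments):
--     # Pass 0: tokenize every comment once.
--     tokenized = [tokenizer(comment) for comment in comments]
--     # Pass 1: vocabulary only (first-appearance order); next index = len(index_word_map).
--     word_index_map = {'PAD_TOKEN': 0}
--     index_word_map = ['PAD_TOKEN']
--     for tokens in tokenized:
--         for token in tokens:
--             if token not in word_index_map:
--                 word_index_map[token] = len(index_word_map)
--                 index_word_map.append(token)
--     # Pass 2: frequencies in one Counter over the flattened token stream.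
--     freqs = dict(Counter(t for tokens in tokenized for t in tokens))
--     # Pass 3: sequences as a pure mapping pass through the finished vocabulary.
--     sequences = [[word_index_map[t] for t in tokens] for tokens in tokenized]
--     return sequences, word_index_map, index_word_map, freqs
-- ===== Notes on version B (the rewrite author's own statement) =====
-- stated objective: alternative
-- what changed: A builds sequences, vocabulary and frequencies interleaved in one nested loop with an explicit current_index counter; B tokenizes once, then builds only the vocabulary (next index = len(index_word_map)) in one pass, gets frequencies from a single Counter over the flattened token stream, and produces sequences in a separate pure mapping pass over the finished vocabulary.
import Mathlib
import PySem

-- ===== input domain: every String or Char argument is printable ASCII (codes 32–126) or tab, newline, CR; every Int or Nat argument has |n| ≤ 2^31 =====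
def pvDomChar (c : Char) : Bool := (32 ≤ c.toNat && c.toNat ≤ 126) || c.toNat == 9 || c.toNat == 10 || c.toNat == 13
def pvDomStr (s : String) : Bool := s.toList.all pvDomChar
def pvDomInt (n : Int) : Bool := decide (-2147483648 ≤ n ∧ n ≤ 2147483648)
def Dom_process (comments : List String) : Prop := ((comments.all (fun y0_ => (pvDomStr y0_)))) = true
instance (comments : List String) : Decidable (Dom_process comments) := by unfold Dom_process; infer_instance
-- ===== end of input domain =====

-- B keeps A's return value on every input but a different decomposition: tokenize once, vocabulary-only pass,
-- frequencies from one Counter over the flattened tokens, sequences as a separate mapping pass (objective: alternative).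

-- ===== PORT A =====
-- string.punctuation
def pyPunctuation : List Char := "!\"#$%&'()*+,-./:;<=>?@[\\]^_`{|}~".toList

-- s.translate(str.maketrans('', '', string.punctuation)); s.lower(); s.split()
def tokenizer (s : String) : List String :=
  PySem.Str.split₀ (PySem.Str.lower (String.ofList (s.toList.filter (fun c => !(pyPunctuation.contains c)))))

-- the body of A's inner `for token in tokens` loop; state = (word_index_map, current_index, index_word_map, freqs, sequence)
def processTok (st : PySem.Dict String Int × Int × List String × PySem.Dict String Int × List Int)
    (token : String) : PySem.Dict String Int × Int × List String × PySem.Dict String Int × List Int :=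
  let (wim, ci, iwm, freqs, seq) := st
  if wim.contains token = false then
    let wim' := wim.insert token ci
    -- sequence.append(word_index_map[token]); the key was just inserted, so getD is exact for Python's d[token]
    (wim', ci + 1, iwm ++ [token], freqs.insert token 1, seq ++ [wim'.getD token 0])
  else
    -- freqs[token] += 1; the key is present on every Python-reachable state (tokens are lowercased), so modify is exact
    (wim, ci, iwm, freqs.modify token 0 (· + 1), seq ++ [wim.getD token 0])

def process (comments : List String) : List (List Int) × (List (String × Int)) × List String × (List (String × Int)) :=
  let st0 : PySem.Dict String Int × Int × List String × PySem.Dict String Int × List (List Int) :=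
    (PySem.Dict.ofList [("PAD_TOKEN", (0 : Int))], 1, ["PAD_TOKEN"], PySem.Dict.empty, [])
  let fin := comments.foldl (fun st comment =>
    let r := (tokenizer comment).foldl processTok (st.1, st.2.1, st.2.2.1, st.2.2.2.1, [])
    (r.1, r.2.1, r.2.2.1, r.2.2.2.1, st.2.2.2.2 ++ [r.2.2.2.2])) st0
  (fin.2.2.2.2, fin.1.items, fin.2.2.1, fin.2.2.2.1.items)

-- ===== PORT B =====
-- the body of B's vocabulary-only pass; state = (word_index_map, index_word_map)
def vocabStep (st : PySem.Dict String Int × List String) (t : String) :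
    PySem.Dict String Int × List String :=
  if st.1.contains t then st else (st.1.insert t (st.2.length : Int), st.2 ++ [t])

def process_alt (comments : List String) : List (List Int) × (List (String × Int)) × List String × (List (String × Int)) :=
  let tokenized := comments.map tokenizer
  let vocab := tokenized.foldl (fun st tokens => tokens.foldl vocabStep st)
    (PySem.Dict.ofList [("PAD_TOKEN", (0 : Int))], ["PAD_TOKEN"])
  let freqs := PySem.Dict.counter tokenized.flatten
  let sequences := tokenized.map (fun tokens => tokens.map (fun t => vocab.1.getD t 0))
  (sequences, vocab.1.items, vocab.2, freqs.items)

-- ===== PRECONDITION & SPEC =====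
def Spec_process (comments : List String) (out : List (List Int) × (List (String × Int)) × List String × (List (String × Int))) : Prop := out = process_alt comments
instance (comments : List String) (out : List (List Int) × (List (String × Int)) × List String × (List (String × Int))) : Decidable (Spec_process comments out) := by unfold Spec_process; infer_instance

-- ===== CLAIM (what is proved, stated in full; the proofs are below) =====
def Claim_equal_process : Prop := ∀ (comments : List String), Dom_process comments → Spec_process comments (process comments)

-- ===== LEMMAS AND PROOFS =====

-- contains is preserved by the vocabulary fold
theorem vocab_contains_mono (ts : List String) (st : PySem.Dict String Int × List String)
    (t : String) (h : st.1.contains t = true) :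
    (ts.foldl vocabStep st).1.contains t = true := by
  induction ts generalizing st with
  | nil => exact h
  | cons u us ih =>
    refine ih _ ?_
    by_cases hc : st.1.contains u = true
    · simpa [vocabStep, hc] using h
    · simp only [Bool.not_eq_true] at hc
      simp [vocabStep, hc, PySem.Dict.contains_insert, h]

-- getD of a present key is unchanged by the vocabulary fold
theorem vocab_getD_mono (ts : List String) (st : PySem.Dict String Int × List String)
    (t : String) (h : st.1.contains t = true) :
    (ts.foldl vocabStep st).1.getD t 0 = st.1.getD t 0 := by
  induction ts generalizing st with
  | nil => rfl
  | cons u us ih =>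
    by_cases hc : st.1.contains u = true
    · rw [List.foldl_cons]; rw [show vocabStep st u = st by simp [vocabStep, hc]]
      exact ih _ h
    · simp only [Bool.not_eq_true] at hc
      have hne : t ≠ u := by rintro rfl; rw [h] at hc; cases hc
      rw [List.foldl_cons]
      rw [show vocabStep st u = (st.1.insert u (st.2.length : Int), st.2 ++ [u]) by
        simp [vocabStep, hc]]
      rw [ih _ (by simp [PySem.Dict.contains_insert, h])]
      exact PySem.Dict.getD_insert_of_ne _ _ _ hne

-- each processed token is present afterwards
theorem vocab_contains_mem (ts : List String) (st : PySem.Dict String Int × List String)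
    (t : String) (h : t ∈ ts) :
    (ts.foldl vocabStep st).1.contains t = true := by
  induction ts generalizing st with
  | nil => cases h
  | cons u us ih =>
    rcases List.mem_cons.1 h with rfl | hm
    · refine vocab_contains_mono us _ t ?_
      by_cases hc : st.1.contains t = true
      · simp [vocabStep, hc]
      · simp only [Bool.not_eq_true] at hc
        simp [vocabStep, hc, PySem.Dict.contains_insert_self]
    · exact ih _ hm

-- fresh-key insert of 1 is the counter's modify step
theorem insert_one_eq_modify (d : PySem.Dict String Int) (t : String)
    (h : d.contains t = false) : d.insert t 1 = d.modify t 0 (· + 1) := by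
  simp [PySem.Dict.modify, PySem.Dict.getD_of_not_contains d 0 h]

-- A's inner token loop, characterised by B's three separate passes
theorem inner_loop_eq (toks : List String) (wim : PySem.Dict String Int) (iwm : List String)
    (freqs : PySem.Dict String Int) (seq : List Int)
    (hf : ∀ t, freqs.contains t = true → wim.contains t = true) :
    toks.foldl processTok (wim, (iwm.length : Int), iwm, freqs, seq)
      = ((toks.foldl vocabStep (wim, iwm)).1,
         ((toks.foldl vocabStep (wim, iwm)).2.length : Int),
         (toks.foldl vocabStep (wim, iwm)).2,
         toks.foldl (fun d t => d.modify t 0 (· + 1)) freqs,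
         seq ++ toks.map (fun t => (toks.foldl vocabStep (wim, iwm)).1.getD t 0)) := by
  induction toks generalizing wim iwm freqs seq with
  | nil => simp
  | cons t ts ih =>
    by_cases h : wim.contains t = true
    · have hstep : processTok (wim, (iwm.length : Int), iwm, freqs, seq) t
          = (wim, (iwm.length : Int), iwm, freqs.modify t 0 (· + 1), seq ++ [wim.getD t 0]) := by
        simp [processTok, h]
      have hvs : vocabStep (wim, iwm) t = (wim, iwm) := by simp [vocabStep, h]
      have hf' : ∀ u, (freqs.modify t 0 (· + 1)).contains u = true → wim.contains u = true := by
        intro u hu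
        rw [PySem.Dict.contains_modify] at hu
        rcases (by simpa using hu : u = t ∨ freqs.contains u = true) with rfl | hu'
        · exact h
        · exact hf u hu'
      have hg := vocab_getD_mono ts (wim, iwm) t h
      rw [List.foldl_cons, hstep, ih _ _ _ _ hf', List.foldl_cons, hvs, List.foldl_cons]
      simp [hg, List.append_assoc]
    · simp only [Bool.not_eq_true] at h
      have hstep : processTok (wim, (iwm.length : Int), iwm, freqs, seq) t
          = (wim.insert t (iwm.length : Int), ((iwm ++ [t]).length : Int), iwm ++ [t],
             freqs.insert t 1,
             seq ++ [(wim.insert t (iwm.length : Int)).getD t 0]) := by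
        simp [processTok, h]
      have hvs : vocabStep (wim, iwm) t = (wim.insert t (iwm.length : Int), iwm ++ [t]) := by
        simp [vocabStep, h]
      have hfc : freqs.contains t = false := by
        by_contra hx
        simp only [Bool.not_eq_false] at hx
        rw [hf t hx] at h; cases h
      have hf' : ∀ u, (freqs.modify t 0 (· + 1)).contains u = true
          → (wim.insert t (iwm.length : Int)).contains u = true := by
        intro u hu
        rw [PySem.Dict.contains_modify] at hu
        rw [PySem.Dict.contains_insert]
        rcases (by simpa using hu : u = t ∨ freqs.contains u = true) with rfl | hu'
        · simp
        · simp [hf u hu']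
      have hg := vocab_getD_mono ts (wim.insert t (iwm.length : Int), iwm ++ [t]) t
        (PySem.Dict.contains_insert_self _ _ _)
      rw [List.foldl_cons, hstep, insert_one_eq_modify freqs t hfc,
        ih _ _ _ _ hf', List.foldl_cons, hvs, List.foldl_cons]
      simp [hg, List.append_assoc]

-- invariant: every key of the frequency fold is a key of the vocabulary fold
theorem inner_inv (toks : List String) (wim : PySem.Dict String Int) (iwm : List String)
    (freqs : PySem.Dict String Int)
    (hf : ∀ t, freqs.contains t = true → wim.contains t = true) :
    ∀ t, (toks.foldl (fun d t => d.modify t 0 (· + 1)) freqs).contains t = true →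
      (toks.foldl vocabStep (wim, iwm)).1.contains t = true := by
  induction toks generalizing wim iwm freqs with
  | nil => exact hf
  | cons u us ih =>
    intro t ht
    rw [List.foldl_cons] at ht
    rw [List.foldl_cons]
    by_cases hc : wim.contains u = true
    · have hvs : vocabStep (wim, iwm) u = (wim, iwm) := by simp [vocabStep, hc]
      rw [hvs]
      refine ih wim iwm _ ?_ t ht
      intro v hv
      rw [PySem.Dict.contains_modify] at hv
      rcases (by simpa using hv : v = u ∨ freqs.contains v = true) with rfl | hv'
      · exact hc
      · exact hf v hv'
    · simp only [Bool.not_eq_true] at hc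
      have hvs : vocabStep (wim, iwm) u = (wim.insert u (iwm.length : Int), iwm ++ [u]) := by
        simp [vocabStep, hc]
      rw [hvs]
      refine ih _ _ _ ?_ t ht
      intro v hv
      rw [PySem.Dict.contains_modify] at hv
      rw [PySem.Dict.contains_insert]
      rcases (by simpa using hv : v = u ∨ freqs.contains v = true) with rfl | hv'
      · simp
      · simp [hf v hv']

-- A's outer loop over already-tokenized comments
theorem outer_loop_eq (TL : List (List String)) (wim : PySem.Dict String Int) (iwm : List String)
    (freqs : PySem.Dict String Int) (seqs : List (List Int))
    (hf : ∀ t, freqs.contains t = true → wim.contains t = true) :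
    TL.foldl (fun st toks =>
        let r := toks.foldl processTok (st.1, st.2.1, st.2.2.1, st.2.2.2.1, [])
        (r.1, r.2.1, r.2.2.1, r.2.2.2.1, st.2.2.2.2 ++ [r.2.2.2.2]))
        (wim, (iwm.length : Int), iwm, freqs, seqs)
      = ((TL.foldl (fun st toks => toks.foldl vocabStep st) (wim, iwm)).1,
         ((TL.foldl (fun st toks => toks.foldl vocabStep st) (wim, iwm)).2.length : Int),
         (TL.foldl (fun st toks => toks.foldl vocabStep st) (wim, iwm)).2,
         TL.flatten.foldl (fun d t => d.modify t 0 (· + 1)) freqs,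
         seqs ++ TL.map (fun toks => toks.map (fun t =>
           (TL.foldl (fun st toks => toks.foldl vocabStep st) (wim, iwm)).1.getD t 0))) := by
  induction TL generalizing wim iwm freqs seqs with
  | nil => simp
  | cons toks rest ih =>
    rw [List.foldl_cons]
    have hin := inner_loop_eq toks wim iwm freqs [] hf
    have hf' := inner_inv toks wim iwm freqs hf
    dsimp only
    rw [hin]
    dsimp only
    simp only [List.nil_append]
    rw [ih _ _ _ _ hf']
    rw [List.foldl_cons, List.flatten_cons, List.foldl_append, List.map_cons]
    have hmap : toks.map (fun t => (toks.foldl vocabStep (wim, iwm)).1.getD t 0)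
        = toks.map (fun t =>
            (rest.foldl (fun st toks => toks.foldl vocabStep st) (toks.foldl vocabStep (wim, iwm))).1.getD t 0) := by
      refine List.map_congr_left (fun t ht => ?_)
      have hc := vocab_contains_mem toks (wim, iwm) t ht
      have := vocab_getD_mono rest.flatten (toks.foldl vocabStep (wim, iwm)) t hc
      rw [List.foldl_flatten] at this
      exact this.symm
    rw [hmap, List.append_assoc]
    simp

-- ===== VERDICT (by name: the statement is the Claim_ definition above) =====
theorem process_spec : Claim_equal_process := by
  intro comments _
  unfold Spec_process process process_alt
  have h0 : ∀ t, (PySem.Dict.empty : PySem.Dict String Int).contains t = true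
      → (PySem.Dict.ofList [("PAD_TOKEN", (0 : Int))]).contains t = true := by
    intro t ht
    rw [PySem.Dict.contains_empty] at ht
    cases ht
  have key := outer_loop_eq (comments.map tokenizer)
    (PySem.Dict.ofList [("PAD_TOKEN", (0 : Int))]) ["PAD_TOKEN"] PySem.Dict.empty [] h0
  rw [List.foldl_map] at key
  simp only [List.length_cons, List.length_nil, Nat.zero_add, Nat.cast_one] at key
  dsimp only
  rw [key]
  rw [← PySem.Dict.counter_eq_foldl]
  simp
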